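-- pv_equiv track=rewrite | github.com/15091444119/MASS | MASS-unsupNMT/src/evaluation/eval_attention/eval_subword_attention_rate.py | calculate_word_and_bped_word
-- ===== SOURCE A (Python) =====
-- def calculate_word_and_bped_word(sent, slen):
--     sent = sent[1:slen - 1] # remove bos and eos
--     idx = 0
--     word_count = 0
--     bped_word_count = 0
--     while(idx < len(sent)):
--         if "@@" in sent[idx]:
--             while(idx < len(sent) and "@@" in sent[idx]):
--                 idx += 1
--             if idx == len(sent):
--                 break
--             word_count += 1
--             bped_word_count += 1
--         else:
--             word_count += 1
--
--         idx += 1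
--
--     return word_count, bped_word_count
-- ===== SOURCE B (Python) =====
-- def calculate_word_and_bped_word(sent, slen):
--     word_count = 0
--     bped_word_count = 0
--     prev_bpe = False
--     for tok in sent[1:slen - 1]:
--         cur = "@@" in tok
--         if not cur:
--             word_count += 1
--             if prev_bpe:
--                 bped_word_count += 1
--         prev_bpe = cur
--     return word_count, bped_word_count
-- ===== Notes on version B (the rewrite author's own statement) =====
-- stated objective: simpler
-- what changed: Replaced the index-based while loop with a nested run-skipping while and a break for trailing '@@' tokens by a single flat for-loop carrying a prev-token-was-BPE boolean: every non-'@@' token counts as a word, and as a BPE-split word when the preceding token contained '@@'.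
import Mathlib
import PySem

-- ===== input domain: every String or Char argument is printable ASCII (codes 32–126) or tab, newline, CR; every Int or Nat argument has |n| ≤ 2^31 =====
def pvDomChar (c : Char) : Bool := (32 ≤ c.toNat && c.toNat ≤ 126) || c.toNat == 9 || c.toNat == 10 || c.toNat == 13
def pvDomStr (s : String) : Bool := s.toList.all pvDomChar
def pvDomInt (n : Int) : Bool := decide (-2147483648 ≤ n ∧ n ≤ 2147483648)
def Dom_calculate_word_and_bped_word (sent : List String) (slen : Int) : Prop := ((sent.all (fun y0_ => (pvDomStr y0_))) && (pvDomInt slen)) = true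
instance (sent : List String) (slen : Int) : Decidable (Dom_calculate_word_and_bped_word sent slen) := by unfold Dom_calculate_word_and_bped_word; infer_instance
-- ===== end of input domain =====

-- B replaces A's nested run-skipping while-loop (with its end-of-list break) by one flat
-- pass carrying a "previous token contained '@@'" boolean; objective: simpler.

-- ===== PORT A =====
-- the outer while loop of A: idx-based loop rendered as recursion on the remaining suffix;
-- the inner run-skipping while is List.dropWhile, the 'if idx == len(sent): break' is the [] case
def pvLoopA : List String → Int → Int → Int × Int
  | [], wc, bc => (wc, bc)
  | t :: rest, wc, bc =>
    if PySem.Str.isIn "@@" t then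
      match h : rest.dropWhile (fun s => PySem.Str.isIn "@@" s) with
      | [] => (wc, bc)
      | _ :: rest' => pvLoopA rest' (wc + 1) (bc + 1)
    else
      pvLoopA rest (wc + 1) bc
termination_by l _ _ => l.length
decreasing_by
· have : (rest.dropWhile (fun s => PySem.Str.isIn "@@" s)).length ≤ rest.length :=
    (List.dropWhile_sublist _).length_le
  simp_all; omega
· simp

def calculate_word_and_bped_word (sent : List String) (slen : Int) : Int × Int :=
  pvLoopA (PySem.List.slice sent (some 1) (some (slen - 1))) 0 0

-- ===== PORT B =====
-- Source B's for-loop: fold over the tokens with state (word_count, bped_word_count, prev_bpe)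
def pvStepB (st : Int × Int × Bool) (tok : String) : Int × Int × Bool :=
  let cur := PySem.Str.isIn "@@" tok
  if !cur then (st.1 + 1, (if st.2.2 then st.2.1 + 1 else st.2.1), cur)
  else (st.1, st.2.1, cur)

def calculate_word_and_bped_word_alt (sent : List String) (slen : Int) : Int × Int :=
  let st := (PySem.List.slice sent (some 1) (some (slen - 1))).foldl pvStepB (0, 0, false)
  (st.1, st.2.1)

-- ===== PRECONDITION & SPEC =====
def Spec_calculate_word_and_bped_word (sent : List String) (slen : Int) (out : Int × Int) : Prop := out = calculate_word_and_bped_word_alt sent slen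
instance (sent : List String) (slen : Int) (out : Int × Int) : Decidable (Spec_calculate_word_and_bped_word sent slen out) := by unfold Spec_calculate_word_and_bped_word; infer_instance

-- ===== CLAIM (what is proved, stated in full; the proofs are below) =====
def Claim_equal_calculate_word_and_bped_word : Prop := ∀ (sent : List String) (slen : Int), Dom_calculate_word_and_bped_word sent slen → Spec_calculate_word_and_bped_word sent slen (calculate_word_and_bped_word sent slen)


-- ===== LEMMAS AND PROOFS =====

-- the head of a nonempty dropWhile result falsifies the predicate
theorem pvDropWhile_head_false {a : Type} (p : a -> Bool) (l : List a) (u : a) (rest' : List a)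
    (h : l.dropWhile p = u :: rest') : p u = false := by
  induction l with
  | nil => simp at h
  | cons x l ih =>
    by_cases hp : p x = true
    · rw [List.dropWhile_cons, if_pos hp] at h; exact ih h
    · rw [List.dropWhile_cons, if_neg hp] at h
      cases h; simpa using hp

theorem pvStepB_bpe (t : String) (ht : PySem.Str.isIn "@@" t = true) (wc bc : Int) (prev : Bool) :
    pvStepB (wc, bc, prev) t = (wc, bc, true) := by
  simp only [pvStepB]; rw [ht]; simp

theorem pvStepB_word (t : String) (ht : PySem.Str.isIn "@@" t = false) (wc bc : Int) (prev : Bool) :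
    pvStepB (wc, bc, prev) t = (wc + 1, (if prev then bc + 1 else bc), false) := by
  simp only [pvStepB]; rw [ht]; simp

-- B's fold entered with prev_bpe = true behaves like A's inner run-skip plus double count
theorem pvFoldB_true (l : List String) (wc bc : Int) :
    l.foldl pvStepB (wc, bc, true) =
      match l.dropWhile (fun s => PySem.Str.isIn "@@" s) with
      | [] => (wc, bc, true)
      | u :: rest' => rest'.foldl pvStepB (wc + 1, bc + 1, PySem.Str.isIn "@@" u) := by
  induction l generalizing wc bc with
  | nil => simp
  | cons t rest ih =>
    by_cases h : PySem.Str.isIn "@@" t = true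
    · rw [List.foldl_cons, pvStepB_bpe t h, List.dropWhile_cons]
      simp only [h, if_true, ih]
    · have h' : PySem.Str.isIn "@@" t = false := (Bool.not_eq_true _).mp h
      rw [List.foldl_cons, pvStepB_word t h', List.dropWhile_cons]
      simp only [h', Bool.false_eq_true, if_false]
      simp

-- A's outer loop equals B's fold started with prev_bpe = false
theorem pvLoopA_eq_foldB (l : List String) (wc bc : Int) :
    pvLoopA l wc bc = ((l.foldl pvStepB (wc, bc, false)).1, (l.foldl pvStepB (wc, bc, false)).2.1) := by
  induction l, wc, bc using pvLoopA.induct with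
  | case1 wc bc => simp [pvLoopA]
  | case2 t rest wc bc ht hdrop =>
    rw [pvLoopA, if_pos ht, List.foldl_cons, pvStepB_bpe t ht, pvFoldB_true]
    split
    · next heq => rw [heq]
    · next u' rest'' heq => rw [heq] at hdrop; cases hdrop
  | case3 t rest wc bc ht u rest' hdrop ih =>
    have hu : PySem.Str.isIn "@@" u = false :=
      pvDropWhile_head_false (fun s => PySem.Str.isIn "@@" s) rest u rest' hdrop
    rw [pvLoopA, if_pos ht, List.foldl_cons, pvStepB_bpe t ht, pvFoldB_true]
    split
    · next hnil => rw [hnil] at hdrop; cases hdrop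
    · next u' rest'' heq =>
      rw [heq] at hdrop
      injection hdrop with h1 h2
      split
      · next heq2 => rw [heq] at heq2; cases heq2
      · next u3 rest3 heq2 =>
        rw [heq] at heq2
        injection heq2 with h3 h4
        subst h1; subst h2; subst h3; subst h4
        rw [hu]
        exact ih
  | case4 t rest wc bc ht ih =>
    have ht' : PySem.Str.isIn "@@" t = false := (Bool.not_eq_true _).mp ht
    rw [pvLoopA, if_neg ht, List.foldl_cons, pvStepB_word t ht']
    simpa using ih

-- ===== VERDICT (by name: the statement is the Claim_ definition above) =====
theorem calculate_word_and_bped_word_spec : Claim_equal_calculate_word_and_bped_word := by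
  intro sent slen _
  unfold Spec_calculate_word_and_bped_word calculate_word_and_bped_word calculate_word_and_bped_word_alt
  rw [pvLoopA_eq_foldB]
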